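-- pv_equiv track=rewrite | github.com/dicquiloan/playgrid | pgqlearning/TrellisBattleships.py | hitShip
-- ===== SOURCE A (Python) =====
-- def hitShip(ship,x,y):
--     intactSections = len(ship)
--     result = 0 # Default to miss
--     for i in range(len(ship)):
--         if x == ship[i][0] and y == ship[i][1]:
--             # Mark ship hit
--             ship[i][2] = 1
--             intactSections += -1
--             result = 1
--         elif ship[i][2] != 0:
--             intactSections += -1
--
--     if result == 1 and intactSections == 0:
--         result = 2 # Ship sunk
--
--     return result
-- ===== SOURCE B (Python) =====
-- def hitShip(ship, x, y):
--     hit = False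
--     for seg in ship:
--         if x == seg[0] and y == seg[1]:
--             seg[2] = 1
--             hit = True
--     if not hit:
--         return 0
--     return 2 if all(seg[2] != 0 for seg in ship) else 1
-- ===== Notes on version B (the rewrite author's own statement) =====
-- stated objective: simpler
-- what changed: B drops A's running intactSections counter: it marks every matching segment in one pass, then derives 'sunk' with a whole-list all(seg[2] != 0) predicate over the mutated ship.
import Mathlib
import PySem

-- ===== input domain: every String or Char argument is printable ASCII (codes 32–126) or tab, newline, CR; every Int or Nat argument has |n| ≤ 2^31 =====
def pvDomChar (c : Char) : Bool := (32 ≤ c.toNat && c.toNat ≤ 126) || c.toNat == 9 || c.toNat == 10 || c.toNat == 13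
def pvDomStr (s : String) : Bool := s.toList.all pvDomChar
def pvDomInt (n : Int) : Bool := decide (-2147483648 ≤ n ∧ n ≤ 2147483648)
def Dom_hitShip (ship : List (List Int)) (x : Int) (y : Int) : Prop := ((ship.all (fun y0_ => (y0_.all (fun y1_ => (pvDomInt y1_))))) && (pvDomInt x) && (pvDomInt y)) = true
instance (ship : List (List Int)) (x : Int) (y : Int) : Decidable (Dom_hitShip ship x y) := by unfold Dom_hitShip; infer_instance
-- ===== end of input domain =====

-- B replaces A's running intactSections counter by a mark-all pass plus a whole-list all(seg[2] != 0)
-- sunk check (objective: simpler). Both Pythons mutate matched segments in place (seg[2] = 1) identically;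
-- the equivalence proved here is about the RETURN value only.

-- ===== PORT A =====
-- seg[i] for i = 0,1,2; Pre_hitShip guarantees the index is in range (Python raises IndexError otherwise).
def pvGetA (seg : List Int) (i : Int) : Int := (PySem.List.pyGet? seg i).getD 0

-- A's in-place write ship[i][2] = 1 only affects index i, which the loop never reads again,
-- so the fold over the ORIGINAL list computes A's returned value exactly.
def hitShip (ship : List (List Int)) (x : Int) (y : Int) : Int :=
  let st := ship.foldl (fun (st : Int × Int) seg =>
    if x = pvGetA seg 0 ∧ y = pvGetA seg 1 then (st.1 - 1, 1)
    else if pvGetA seg 2 ≠ 0 then (st.1 - 1, st.2)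
    else st) ((ship.length : Int), 0)
  if st.2 = 1 ∧ st.1 = 0 then 2 else st.2

-- ===== PORT B =====
-- B's first loop builds the mutated ship (matched segments get seg[2] = 1) and the hit flag;
-- List.set 2 1 is Python's seg[2] = 1 (in range by Pre_hitShip).
def hitShip_alt (ship : List (List Int)) (x : Int) (y : Int) : Int :=
  let st : List (List Int) × Bool := ship.foldl (fun st seg =>
    if x = pvGetA seg 0 ∧ y = pvGetA seg 1 then (st.1 ++ [seg.set 2 1], true)
    else (st.1 ++ [seg], st.2)) ([], false)
  if st.2 = false then 0
  else if st.1.all (fun seg => pvGetA seg 2 ≠ 0) then 2 else 1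

-- ===== PRECONDITION & SPEC =====
-- Pre_ excludes exactly the inputs where Python A raises IndexError: A touches seg[2] of every
-- segment (write when matched, read otherwise), so it raises iff some segment has fewer than 3 entries.
def Pre_hitShip (ship : List (List Int)) (x : Int) (y : Int) : Prop :=
  ∀ seg ∈ ship, 3 ≤ seg.length
instance (ship : List (List Int)) (x : Int) (y : Int) : Decidable (Pre_hitShip ship x y) := by unfold Pre_hitShip; infer_instance
def pvWitness_hitShip : List (List Int) × Int × Int := ([[0, 0, 0], [1, 2, 1]], 0, 0)

def Spec_hitShip (ship : List (List Int)) (x : Int) (y : Int) (out : Int) : Prop := out = hitShip_alt ship x y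
instance (ship : List (List Int)) (x : Int) (y : Int) (out : Int) : Decidable (Spec_hitShip ship x y out) := by unfold Spec_hitShip; infer_instance

-- ===== CLAIM (what is proved, stated in full; the proofs are below) =====
def Claim_equal_hitShip : Prop := ∀ (ship : List (List Int)) (x : Int) (y : Int), Dom_hitShip ship x y → Pre_hitShip ship x y → Spec_hitShip ship x y (hitShip ship x y)

-- ===== LEMMAS AND PROOFS =====

-- match predicate and "hit or already damaged" predicate, as Bool
def pvM (x y : Int) (seg : List Int) : Bool := decide (x = pvGetA seg 0 ∧ y = pvGetA seg 1)
def pvP (x y : Int) (seg : List Int) : Bool := pvM x y seg || decide (pvGetA seg 2 ≠ 0)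

theorem loopA_char (x y : Int) (l : List (List Int)) (i0 r0 : Int) :
    l.foldl (fun (st : Int × Int) seg =>
      if x = pvGetA seg 0 ∧ y = pvGetA seg 1 then (st.1 - 1, 1)
      else if pvGetA seg 2 ≠ 0 then (st.1 - 1, st.2)
      else st) (i0, r0)
    = (i0 - (l.countP (pvP x y) : Int), if l.any (pvM x y) then 1 else r0) := by
  induction l generalizing i0 r0 with
  | nil => simp
  | cons seg t ih =>
    rw [List.foldl_cons]
    by_cases hm : x = pvGetA seg 0 ∧ y = pvGetA seg 1
    · have hp : pvP x y seg = true := by simp [pvP, pvM, hm]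
      have ha : (seg :: t).any (pvM x y) = true := by simp [List.any_cons, pvM, hm]
      rw [if_pos hm, ih, ha, List.countP_cons_of_pos hp]
      refine Prod.ext ?_ ?_
      · push_cast; ring
      · simp
    · rw [if_neg hm]
      have hmf : pvM x y seg = false := by simp [pvM, hm]
      by_cases hd : pvGetA seg 2 ≠ 0
      · have hp : pvP x y seg = true := by simp [pvP, hmf, hd]
        rw [if_pos hd, ih, List.countP_cons_of_pos hp]
        refine Prod.ext ?_ ?_
        · push_cast; ring
        · simp [List.any_cons, hmf]
      · have hp : ¬ pvP x y seg = true := by simp [pvP, hmf]; simpa using hd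
        rw [if_neg hd, ih, List.countP_cons_of_neg hp]
        refine Prod.ext ?_ ?_
        · simp
        · simp [List.any_cons, hmf]

theorem loopB_char (x y : Int) (l : List (List Int)) (acc : List (List Int)) (h0 : Bool) :
    l.foldl (fun (st : List (List Int) × Bool) seg =>
      if x = pvGetA seg 0 ∧ y = pvGetA seg 1 then (st.1 ++ [seg.set 2 1], true)
      else (st.1 ++ [seg], st.2)) (acc, h0)
    = (acc ++ l.map (fun seg => if pvM x y seg then seg.set 2 1 else seg), h0 || l.any (pvM x y)) := by
  induction l generalizing acc h0 with
  | nil => simp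
  | cons seg t ih =>
    rw [List.foldl_cons]
    by_cases hm : x = pvGetA seg 0 ∧ y = pvGetA seg 1
    · have hmt : pvM x y seg = true := by simp [pvM, hm]
      rw [if_pos hm, ih]
      simp [hmt, List.any_cons]
    · have hmf : pvM x y seg = false := by simp [pvM, hm]
      rw [if_neg hm, ih]
      simp [hmf, List.any_cons]

-- on a segment of length ≥ 3, "hit-or-damaged" is exactly "index 2 nonzero after marking"
theorem mark_nonzero (x y : Int) (seg : List Int) (h : 3 ≤ seg.length) :
    (pvP x y seg = true) ↔ pvGetA (if pvM x y seg then seg.set 2 1 else seg) 2 ≠ 0 := by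
  by_cases hm : x = pvGetA seg 0 ∧ y = pvGetA seg 1
  · have hset : pvGetA (seg.set 2 1) 2 = 1 := by
      have h2 : (2 : Int) = ((2 : Nat) : Int) := rfl
      rw [pvGetA, h2, PySem.List.pyGet?_natCast, List.getElem?_set_self]
      simp
      omega
    simp [pvP, pvM, hm, hset]
  · simp [pvP, pvM, hm]

-- ===== VERDICT (by name: the statement is the Claim_ definition above) =====
theorem hitShip_spec : Claim_equal_hitShip := by
  intro ship x y _ hpre
  unfold Spec_hitShip hitShip hitShip_alt
  rw [loopA_char, loopB_char]
  simp only [List.nil_append, Bool.false_or]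
  by_cases hany : ship.any (pvM x y)
  · have hle : ship.countP (pvP x y) ≤ ship.length := List.countP_le_length
    by_cases hs : ship.countP (pvP x y) = ship.length
    · have h0 : ((ship.length : Int) - (ship.countP (pvP x y) : Int) = 0) := by omega
      simp [hany, h0]
      intro seg hsm
      exact (mark_nonzero x y seg (hpre seg hsm)).1 (List.countP_eq_length.mp hs seg hsm)
    · have h0 : ¬ ((ship.length : Int) - (ship.countP (pvP x y) : Int) = 0) := by omega
      simp [hany, h0]
      have hnall : ¬ ∀ seg ∈ ship, pvP x y seg = true :=
        fun h => hs (List.countP_eq_length.mpr h)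
      push_neg at hnall
      obtain ⟨seg, hsm, hnp⟩ := hnall
      refine ⟨seg, hsm, ?_⟩
      by_contra hne
      exact hnp ((mark_nonzero x y seg (hpre seg hsm)).2 hne)
  · simp [hany]
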